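-- pv_equiv track=rewrite | github.com/pydata/numexpr | numexpr/necompiler.py | sigPerms
-- ===== SOURCE A (Python) =====
-- def sigPerms(s):
--     """Generate all possible signatures derived by upcasting the given
--     signature.
--     """
--     codes = 'bilfdcx'
--     if not s:
--         yield ''
--     elif s[0] in codes:
--         start = codes.index(s[0])
--         for x in codes[start:]:
--             for y in sigPerms(s[1:]):
--                 yield x + y
--     elif s[0] == 's':  # numbers shall not be cast to strings
--         for y in sigPerms(s[1:]):
--             yield 's' + y
--     else:
--         yield s
-- ===== SOURCE B (Python) =====
-- def sigPerms(s):
--     """Generate all possible signatures derived by upcasting the given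
--     signature.
--     """
--     codes = 'bilfdcx'
--     # build per-position choice lists, then take their Cartesian product
--     options = []
--     for i, c in enumerate(s):
--         if c in codes:
--             options.append(codes[codes.index(c):])
--         elif c == 's':
--             options.append('s')
--         else:
--             options.append([s[i:]])
--             break
--     results = ['']
--     for opts in options:
--         results = [r + c for r in results for c in opts]
--     yield from results
-- ===== Notes on version B (the rewrite author's own statement) =====
-- stated objective: idiomatic
-- what changed: Replaces the recursive generator with a single scan building a per-position choice table followed by one Cartesian-product pass (comprehension fold), matching yield order.
import Mathlib
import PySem

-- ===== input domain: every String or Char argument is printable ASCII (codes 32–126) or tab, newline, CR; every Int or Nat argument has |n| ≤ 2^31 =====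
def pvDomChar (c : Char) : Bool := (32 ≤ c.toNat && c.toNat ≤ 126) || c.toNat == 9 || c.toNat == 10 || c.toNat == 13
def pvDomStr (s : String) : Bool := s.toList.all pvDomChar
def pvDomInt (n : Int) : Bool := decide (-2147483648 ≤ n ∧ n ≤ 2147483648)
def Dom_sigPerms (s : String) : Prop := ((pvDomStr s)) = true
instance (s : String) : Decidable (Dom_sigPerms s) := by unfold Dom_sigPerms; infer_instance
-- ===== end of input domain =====

-- B replaces A's recursive generator by an option-table scan plus one Cartesian-product pass (idiomatic restructuring, same output order).


-- ===== PORT A =====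
-- codes = 'bilfdcx'
def pvCodes : List Char := ['b', 'i', 'l', 'f', 'd', 'c', 'x']

-- recursive generator over the characters of s, collecting the yields in order
def sigPermsChars : List Char → List (List Char)
  | [] => [[]]                                               -- if not s: yield ''
  | c :: rest =>
    if c ∈ pvCodes then                                      -- elif s[0] in codes
      (pvCodes.drop (pvCodes.idxOf c)).flatMap (fun x =>     -- for x in codes[start:]
        (sigPermsChars rest).map (fun y => x :: y))          --   for y in sigPerms(s[1:]): yield x + y
    else if c = 's' then                                     -- elif s[0] == 's'
      (sigPermsChars rest).map (fun y => 's' :: y)           --   for y in sigPerms(s[1:]): yield 's' + y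
    else
      [c :: rest]                                            -- else: yield s

def sigPerms (s : String) : List String :=
  (sigPermsChars s.toList).map (fun l => String.ofList l)

-- ===== PORT B =====
-- scan building per-position choice lists; an unknown char contributes the whole suffix and stops the scan
def pvOptions : List Char → List (List (List Char))
  | [] => []
  | c :: rest =>
    if c ∈ pvCodes then
      ((pvCodes.drop (pvCodes.idxOf c)).map (fun x => [x])) :: pvOptions rest
    else if c = 's' then
      [['s']] :: pvOptions rest
    else
      [[c :: rest]]                                          -- options.append([s[i:]]); break

-- results = ['']; for opts in options: results = [r + c for r in results for c in opts]
def sigPerms_alt (s : String) : List String :=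
  ((pvOptions s.toList).foldl
      (fun results opts => results.flatMap (fun r => opts.map (fun c => r ++ c)))
      [[]]).map (fun l => String.ofList l)

-- ===== PRECONDITION & SPEC =====
def Spec_sigPerms (s : String) (out : List String) : Prop := out = sigPerms_alt s
instance (s : String) (out : List String) : Decidable (Spec_sigPerms s out) := by unfold Spec_sigPerms; infer_instance

-- ===== CLAIM (what is proved, stated in full; the proofs are below) =====
def Claim_equal_sigPerms : Prop := ∀ (s : String), Dom_sigPerms s → Spec_sigPerms s (sigPerms s)

-- ===== LEMMAS AND PROOFS =====

-- list-comprehension algebra used for the codes branch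
theorem pvStep_codes (acc : List (List Char)) (drop : List Char) (P : List (List Char)) :
    ((acc.flatMap (fun r => (drop.map (fun x => [x])).map (fun c => r ++ c))).flatMap
        (fun r => P.map (fun y => r ++ y)))
    = acc.flatMap (fun r => (drop.flatMap (fun x => P.map (fun y => x :: y))).map (fun y => r ++ y)) := by
  simp [List.flatMap_assoc, List.map_flatMap, List.flatMap_map, List.map_map, Function.comp_def]

-- the product fold over the option table expands every accumulator element by all of A's results
theorem pvOptions_foldl (l : List Char) :
    ∀ (acc : List (List Char)),
      (pvOptions l).foldl
        (fun results opts => results.flatMap (fun r => opts.map (fun c => r ++ c))) acc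
      = acc.flatMap (fun r => (sigPermsChars l).map (fun y => r ++ y)) := by
  induction l with
  | nil =>
    intro acc
    simp [pvOptions, sigPermsChars]
  | cons c rest ih =>
    intro acc
    by_cases hc : c ∈ pvCodes
    · simp only [pvOptions, sigPermsChars, if_pos hc, List.foldl_cons, ih]
      exact pvStep_codes acc _ _
    · by_cases hs : c = 's'
      · subst hs
        simp only [pvOptions, sigPermsChars, if_neg hc, if_true, List.foldl_cons]
        rw [ih]
        simp [List.flatMap_assoc, Function.comp_def, List.append_assoc]
      · simp [pvOptions, sigPermsChars, hc, hs]

-- ===== VERDICT (by name: the statement is the Claim_ definition above) =====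
theorem sigPerms_spec : Claim_equal_sigPerms := by
  intro s _
  unfold Spec_sigPerms sigPerms sigPerms_alt
  rw [pvOptions_foldl]
  simp
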